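-- pv_equiv track=rewrite | github.com/RodrigoPazSoldan/Proyecto-Final-IA | Proyectofinal/proyect.py | remove_in_words
-- ===== SOURCE A (Python) =====
-- import string
-- import string
--
-- def remove_in_words(reviews):
--     punct = set(string.punctuation)
--     text = []
--
--     for paragraph in reviews:
--         cleaned_paragraph = []
--         for word in paragraph.split():
--             cleaned_chars = []
--             previous_char = None
--             for letra in word:
--                 if letra.isdigit():
--                     continue
--                 if letra in punct:
--                     if letra != previous_char:
--                         cleaned_chars.append(letra)
--                     previous_char = letra
--                 else:
--                     cleaned_chars.append(letra)
--                     previous_char = letra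
--
--             cleaned_word = ''.join(cleaned_chars)
--             cleaned_paragraph.append(cleaned_word)
--
--         cleaned_paragraph = ' '.join(cleaned_paragraph)
--         text.append(cleaned_paragraph)
--
--     return text
-- ===== SOURCE B (Python) =====
-- import string
-- from itertools import groupby
--
-- def remove_in_words(reviews):
--     punct = set(string.punctuation)
--     out = []
--     for paragraph in reviews:
--         words = []
--         for word in paragraph.split():
--             stripped = ''.join(c for c in word if not c.isdigit())
--             pieces = []
--             for ch, run in groupby(stripped):
--                 pieces.append(ch if ch in punct else ''.join(run))
--             words.append(''.join(pieces))
--         out.append(' '.join(words))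
--     return out
-- ===== Notes on version B (the rewrite author's own statement) =====
-- stated objective: alternative
-- what changed: Replaces the stateful previous_char character scan with a two-phase pass per word: strip digits first, then collapse runs via itertools.groupby, emitting one char for punctuation runs and the whole run otherwise.
import Mathlib
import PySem

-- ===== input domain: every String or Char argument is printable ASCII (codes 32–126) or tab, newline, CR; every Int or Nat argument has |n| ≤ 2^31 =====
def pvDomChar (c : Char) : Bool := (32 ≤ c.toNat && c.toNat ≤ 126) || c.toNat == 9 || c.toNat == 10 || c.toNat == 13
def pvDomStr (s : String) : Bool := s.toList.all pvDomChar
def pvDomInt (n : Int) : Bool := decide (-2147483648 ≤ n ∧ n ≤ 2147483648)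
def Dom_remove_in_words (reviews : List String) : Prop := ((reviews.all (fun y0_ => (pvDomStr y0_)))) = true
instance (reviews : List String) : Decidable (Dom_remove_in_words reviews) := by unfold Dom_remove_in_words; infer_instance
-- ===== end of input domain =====

-- B replaces A's stateful previous_char scan by digit-stripping followed by a groupby-style
-- run-collapsing pass per word (objective: alternative decomposition, same cost).

-- ===== PORT A =====
-- string.punctuation
def pvPunct (c : Char) : Bool := "!\"#$%&'()*+,-./:;<=>?@[\\]^_`{|}~".toList.contains c

-- A's inner loop body: state = (cleaned_chars, previous_char)
def pvAStep (st : List Char × Option Char) (letra : Char) : List Char × Option Char :=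
  if PySem.Chars.isdigit letra then st
  else if pvPunct letra then
    (if some letra ≠ st.2 then (st.1 ++ [letra], some letra) else (st.1, some letra))
  else (st.1 ++ [letra], some letra)

def pvACleanWord (w : List Char) : List Char := (w.foldl pvAStep ([], none)).1

def remove_in_words (reviews : List String) : List String :=
  reviews.map (fun paragraph =>
    PySem.Str.join " " ((PySem.Str.split₀ paragraph).map
      (fun word => String.mk (pvACleanWord word.toList))))

-- ===== PORT B =====
-- itertools.groupby on a char list: the list of (key, run) pairs
def pvGroupRuns : List Char → List (Char × List Char)
  | [] => []
  | c :: t =>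
    match pvGroupRuns t with
    | [] => [(c, [c])]
    | (k, g) :: r => if k = c then (c, c :: g) :: r else (c, [c]) :: (k, g) :: r

def pvBCleanWord (w : List Char) : List Char :=
  (pvGroupRuns (w.filter (fun c => !PySem.Chars.isdigit c))).flatMap
    (fun kg => if pvPunct kg.1 then [kg.1] else kg.2)

def remove_in_words_alt (reviews : List String) : List String :=
  reviews.map (fun paragraph =>
    PySem.Str.join " " ((PySem.Str.split₀ paragraph).map
      (fun word => String.mk (pvBCleanWord word.toList))))

-- ===== PRECONDITION & SPEC =====
def Spec_remove_in_words (reviews : List String) (out : List String) : Prop := out = remove_in_words_alt reviews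
instance (reviews : List String) (out : List String) : Decidable (Spec_remove_in_words reviews out) := by unfold Spec_remove_in_words; infer_instance

-- ===== CLAIM (what is proved, stated in full; the proofs are below) =====
def Claim_equal_remove_in_words : Prop := ∀ (reviews : List String), Dom_remove_in_words reviews → Spec_remove_in_words reviews (remove_in_words reviews)

-- ===== LEMMAS AND PROOFS =====

-- pure recursion computing A's per-word output on a digit-free char list
def pvProcA : List Char → Option Char → List Char
  | [], _ => []
  | c :: t, prev => if pvPunct c ∧ prev = some c then pvProcA t (some c) else c :: pvProcA t (some c)

theorem pvFoldA_eq (l : List Char) : ∀ (acc : List Char) (prev : Option Char),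
    (l.foldl pvAStep (acc, prev)).1 = acc ++ pvProcA (l.filter (fun c => !PySem.Chars.isdigit c)) prev := by
  induction l with
  | nil => intro acc prev; simp [pvProcA]
  | cons c t ih =>
    intro acc prev
    by_cases hd : PySem.Chars.isdigit c
    · simp [pvAStep, hd, ih]
    · by_cases hp : pvPunct c
      · by_cases he : prev = some c
        · simp [pvAStep, hd, hp, he, pvProcA, ih]
        · simp [pvAStep, hd, hp, Ne.symm he, he, pvProcA, ih]
      · simp [pvAStep, hd, hp, pvProcA, ih]

theorem pvGroupRuns_headKey (c : Char) (t : List Char) :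
    ∃ g r, pvGroupRuns (c :: t) = (c, g) :: r := by
  show ∃ g r, (match pvGroupRuns t with
    | [] => [(c, [c])]
    | (k, g) :: r => if k = c then (c, c :: g) :: r else (c, [c]) :: (k, g) :: r) = (c, g) :: r
  match pvGroupRuns t with
  | [] => exact ⟨[c], [], rfl⟩
  | (k, g) :: r =>
    by_cases hk : k = c
    · exact ⟨c :: g, r, by simp [hk]⟩
    · exact ⟨[c], (k, g) :: r, by simp [hk]⟩

def pvFlatG (l : List Char) : List Char :=
  (pvGroupRuns l).flatMap (fun kg => if pvPunct kg.1 then [kg.1] else kg.2)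

theorem pvProcA_eq_flatG_cons (t : List Char) : ∀ c : Char,
    c :: pvProcA t (some c) = pvFlatG (c :: t) := by
  induction t with
  | nil =>
    intro c
    by_cases hp : pvPunct c <;> simp [pvProcA, pvFlatG, pvGroupRuns, hp]
  | cons d t' ih =>
    intro c
    obtain ⟨g, r, hgr⟩ := pvGroupRuns_headKey d t'
    have ihd := ih d
    rw [pvFlatG, hgr, List.flatMap_cons] at ihd
    by_cases hdc : d = c
    · subst hdc
      have hgr2 : pvGroupRuns (d :: d :: t') = (d, d :: g) :: r := by
        show (match pvGroupRuns (d :: t') with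
          | [] => [(d, [d])]
          | (k, g) :: r => if k = d then (d, d :: g) :: r else (d, [d]) :: (k, g) :: r) = _
        rw [hgr]; simp
      rw [pvFlatG, hgr2, List.flatMap_cons]
      by_cases hp : pvPunct d
      · simp only [hp, if_true] at ihd ⊢
        simpa [pvProcA, hp] using ihd
      · simp only [Bool.not_eq_true] at hp
        simp only [hp, Bool.false_eq_true, if_false] at ihd ⊢
        simp only [pvProcA, hp, Bool.false_eq_true, false_and, if_false]
        rw [ihd]
        simp
    · have hgr2 : pvGroupRuns (c :: d :: t') = (c, [c]) :: pvGroupRuns (d :: t') := by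
        show (match pvGroupRuns (d :: t') with
          | [] => [(c, [c])]
          | (k, g) :: r => if k = c then (c, c :: g) :: r else (c, [c]) :: (k, g) :: r) = _
        rw [hgr]; simp [hdc]
      have hcond : ¬ (pvPunct d = true ∧ (some c : Option Char) = some d) := by
        rintro ⟨_, h⟩; exact hdc (by simpa using h.symm)
      rw [pvFlatG, hgr2, List.flatMap_cons, ← pvFlatG]
      rw [pvFlatG, hgr, List.flatMap_cons, ← ihd]
      simp only [pvProcA, if_neg hcond]
      split <;> simp

theorem pvProcA_none (l : List Char) : pvProcA l none = pvFlatG l := by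
  cases l with
  | nil => simp [pvProcA, pvFlatG, pvGroupRuns]
  | cons c t =>
    rw [← pvProcA_eq_flatG_cons]
    simp [pvProcA]

theorem pvCleanWord_eq (w : List Char) : pvACleanWord w = pvBCleanWord w := by
  rw [pvACleanWord, pvFoldA_eq, pvProcA_none, pvBCleanWord, pvFlatG]
  simp

-- ===== VERDICT (by name: the statement is the Claim_ definition above) =====
theorem remove_in_words_spec : Claim_equal_remove_in_words := by
  intro reviews _
  unfold Spec_remove_in_words remove_in_words remove_in_words_alt
  simp [pvCleanWord_eq]
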